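-- pv_equiv track=rewrite | github.com/stallmanifold/codewars | python/src/codewars/kyu4/decode_the_morse_code_part2_2.py | encode_bits
-- ===== SOURCE A (Python) =====
-- def encode_bits(morse_code, period=1):
--     PERIOD = { '.' : 1, '-' : 3 }
--
--     char_count = len(morse_code)
--     bits = ''
--     i = 0
--     while i < char_count:
--         if (i + 1 < char_count) and (morse_code[i] != ' ') and (morse_code[i + 1] == ' '):
--             # We are either at the end of a character, or we are at the end of a word.
--             spaces_found = 0
--             j = i + 1
--             while (j < char_count) and (morse_code[j] == ' '):
--                 spaces_found += 1
--                 j += 1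
--
--             bits += '1' * PERIOD[morse_code[i]] * period
--
--             if spaces_found < 3:
--                 # We are between characters. We use a convention that excess spaces
--                 # less than 3 are interpreted as a single space.
--                 bits += '000' * period
--             else:
--                 # We are between words.
--                 bits += '0000000' * period
--
--             i += spaces_found
--         elif (i + 1 < char_count) and (morse_code[i] != ' ') and (morse_code[i + 1] != ' '):
--             # We are inside a character.
--             bits += '1' * PERIOD[morse_code[i]] * period + '0' * period
--             i += 1
--         elif (i + 1 == char_count) and (morse_code[i] != ' '):
--             # We are at the end of the message.
--             bits += '1' * PERIOD[morse_code[i]] * period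
--             i += 1
--         else:
--             # The spaces are padding at either beginning or the end
--             # of the message.
--             i += 1
--
--     return bits
-- ===== SOURCE B (Python) =====
-- def encode_bits(morse_code, period=1):
--     PERIOD = {'.': 1, '-': 3}
--     # tokenize into single symbol chars and maximal runs of spaces
--     tokens = []
--     for c in morse_code:
--         if c == ' ' and tokens and tokens[-1][0] == ' ':
--             tokens[-1] += ' '
--         else:
--             tokens.append(c)
--     parts = []
--     for k, tok in enumerate(tokens):
--         if tok[0] != ' ':
--             parts.append('1' * (PERIOD[tok] * period))
--             if k + 1 < len(tokens) and tokens[k + 1][0] != ' ':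
--                 parts.append('0' * period)
--         elif k > 0:
--             parts.append(('0000000' if len(tok) >= 3 else '000') * period)
--     return ''.join(parts)
-- ===== Notes on version B (the rewrite author's own statement) =====
-- stated objective: simpler
-- what changed: A's index-driven while-loop with four positional branches and an inner space-counting scan is replaced by a tokenizer (single symbol chars / maximal space runs) followed by one uniform pass over the token list.
import Mathlib
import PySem

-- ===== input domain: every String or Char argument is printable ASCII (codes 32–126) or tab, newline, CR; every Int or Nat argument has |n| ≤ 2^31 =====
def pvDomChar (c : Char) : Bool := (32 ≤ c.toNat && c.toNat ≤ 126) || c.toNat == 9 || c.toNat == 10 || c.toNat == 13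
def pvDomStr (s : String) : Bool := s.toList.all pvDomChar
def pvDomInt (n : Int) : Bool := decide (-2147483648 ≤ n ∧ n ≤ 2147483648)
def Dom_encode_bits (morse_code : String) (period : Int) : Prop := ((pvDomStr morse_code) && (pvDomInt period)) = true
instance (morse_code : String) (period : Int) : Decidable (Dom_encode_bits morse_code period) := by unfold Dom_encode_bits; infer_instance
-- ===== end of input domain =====

-- B replaces A's index-juggling while-loop (with its inner space-counting scan) by a
-- tokenizer (single symbols / maximal space runs) followed by one pass over the tokens
-- (objective: simpler).

-- Python 's * n' for a string/list and an int (n ≤ 0 gives '').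
def pvMul (l : List Char) (n : Int) : List Char := (List.replicate n.toNat l).flatten

-- ===== PORT A =====
-- PERIOD[c]; chars other than '.'/'-' raise KeyError in Python — excluded by Pre_ (default 0 here).
def pvPERIOD (c : Char) : Int := if c = '.' then 1 else if c = '-' then 3 else 0

-- the inner `while (j < char_count) and (morse_code[j] == ' ')` counting loop
def pvCountSpaces : List Char → Nat
  | [] => 0
  | c :: l => if c = ' ' then pvCountSpaces l + 1 else 0

-- the outer while-loop of A, recursing on the suffix of the string starting at index i
def pvAuxA (period : Int) (l : List Char) : List Char :=
  match l with
  | [] => []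
  | c :: rest =>
    if h1 : c ≠ ' ' ∧ rest.head? = some ' ' then
      let s := pvCountSpaces rest
      pvMul (pvMul ['1'] (pvPERIOD c)) period ++
        (if s < 3 then pvMul ['0', '0', '0'] period
         else pvMul ['0', '0', '0', '0', '0', '0', '0'] period) ++
        pvAuxA period ((c :: rest).drop s)
    else if c ≠ ' ' ∧ rest ≠ [] then
      pvMul (pvMul ['1'] (pvPERIOD c)) period ++ pvMul ['0'] period ++ pvAuxA period rest
    else if c ≠ ' ' ∧ rest = [] then
      pvMul (pvMul ['1'] (pvPERIOD c)) period
    else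
      pvAuxA period rest
termination_by l.length
decreasing_by
  · have hs : 1 ≤ pvCountSpaces rest := by
      obtain ⟨-, h⟩ := h1
      cases rest with
      | nil => simp at h
      | cons a t =>
        simp only [List.head?_cons, Option.some.injEq] at h
        simp [pvCountSpaces, h]
    simp only [List.length_drop, List.length_cons]
    omega
  · simp
  · simp

def encode_bits (morse_code : String) (period : Int) : String :=
  String.mk (pvAuxA period morse_code.toList)

-- ===== PORT B =====
-- tok[0] != ' '
def pvIsSym (tok : List Char) : Bool := tok.head? != some ' '

-- PERIOD[tok] where tok is a (one-char) token string; other tokens raise KeyError (excluded by Pre_)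
def pvPERIODtok (tok : List Char) : Int := if tok = ['.'] then 1 else if tok = ['-'] then 3 else 0

-- the tokenizing loop body: extend a trailing space run or start a new token
def pvTokAdd (toks : List (List Char)) (c : Char) : List (List Char) :=
  if c = ' ' && (match toks.getLast? with | some t => t.head? == some ' ' | none => false) then
    toks.dropLast ++ [(toks.getLast?.getD []) ++ [' ']]
  else
    toks ++ [[c]]

def pvTokens (l : List Char) : List (List Char) := l.foldl pvTokAdd []

-- the single pass over the tokens, collecting `parts`; `first` tracks `k > 0`
def pvGoB (period : Int) : Bool → List (List Char) → List (List Char)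
  | _, [] => []
  | first, tok :: rest =>
    if pvIsSym tok then
      pvMul ['1'] (pvPERIODtok tok * period) ::
        ((if (rest.head?.map pvIsSym).getD false then [pvMul ['0'] period] else []) ++
          pvGoB period false rest)
    else if first then
      pvGoB period false rest
    else
      (if 3 ≤ tok.length then pvMul ['0', '0', '0', '0', '0', '0', '0'] period
       else pvMul ['0', '0', '0'] period) :: pvGoB period false rest

def encode_bits_alt (morse_code : String) (period : Int) : String :=
  String.mk (pvGoB period true (pvTokens morse_code.toList)).flatten

-- ===== PRECONDITION & SPEC =====
-- Pre_ excludes exactly the strings containing a character other than '.', '-' and ' ',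
-- on which Python A raises KeyError.
def Pre_encode_bits (morse_code : String) (period : Int) : Prop :=
  morse_code.toList.all (fun c => c = '.' || c = '-' || c = ' ') = true
instance (morse_code : String) (period : Int) : Decidable (Pre_encode_bits morse_code period) := by
  unfold Pre_encode_bits; infer_instance

def pvWitness_encode_bits : String × Int := (".-  .   -", 2)

def Spec_encode_bits (morse_code : String) (period : Int) (out : String) : Prop := out = encode_bits_alt morse_code period
instance (morse_code : String) (period : Int) (out : String) : Decidable (Spec_encode_bits morse_code period out) := by unfold Spec_encode_bits; infer_instance

-- ===== CLAIM (what is proved, stated in full; the proofs are below) =====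
def Claim_equal_encode_bits : Prop := ∀ (morse_code : String) (period : Int), Dom_encode_bits morse_code period → Pre_encode_bits morse_code period → Spec_encode_bits morse_code period (encode_bits morse_code period)

-- ===== LEMMAS AND PROOFS =====

-- proof-only canonical form of the tokenizer
def pvMergeT (t : List Char) (ts : List (List Char)) : List (List Char) :=
  match ts with
  | h :: r => if t.head? = some ' ' ∧ h.head? = some ' ' then (t ++ h) :: r else t :: ts
  | [] => [t]

def pvRecTok : List Char → List (List Char)
  | [] => []
  | c :: l => if c = ' ' then pvMergeT [' '] (pvRecTok l) else [c] :: pvRecTok l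

theorem pvMergeT_nonspace (t : List Char) (ht : t.head? ≠ some ' ') (ts : List (List Char)) :
    pvMergeT t ts = t :: ts := by
  cases ts <;> simp [pvMergeT, ht]

theorem pvMergeT_snoc_space (t : List Char) (ht : t.head? = some ' ') (ts : List (List Char)) :
    pvMergeT (t ++ [' ']) ts = pvMergeT t (pvMergeT [' '] ts) := by
  have htne : t ≠ [] := by intro h; simp [h] at ht
  have hht : (t ++ [' ']).head? = some ' ' := by
    cases t with
    | nil => simp at ht
    | cons a l => simpa using ht
  cases ts with
  | nil => simp [pvMergeT, ht, hht]
  | cons h r =>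
    by_cases hh : h.head? = some ' '
    · simp [pvMergeT, ht, hh, hht, List.append_assoc]
    · simp [pvMergeT, ht, hh, hht]

theorem pvTokens_gen (l : List Char) : ∀ (acc : List (List Char)) (t : List Char), t ≠ [] →
    List.foldl pvTokAdd (acc ++ [t]) l = acc ++ pvMergeT t (pvRecTok l) := by
  induction l with
  | nil => intro acc t ht; simp [pvRecTok, pvMergeT]
  | cons c l ih =>
    intro acc t ht
    have hlast : (acc ++ [t]).getLast? = some t := by simp
    by_cases hc : c = ' '
    · by_cases hth : t.head? = some ' '
      · have hstep : pvTokAdd (acc ++ [t]) c = acc ++ [t ++ [' ']] := by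
          simp [pvTokAdd, hc, hlast, hth]
        rw [List.foldl_cons, hstep, ih acc (t ++ [' ']) (by simp)]
        rw [pvMergeT_snoc_space t hth]
        simp [pvRecTok, hc]
      · have hstep : pvTokAdd (acc ++ [t]) c = (acc ++ [t]) ++ [[c]] := by
          simp [pvTokAdd, hc, hlast, hth]
        rw [List.foldl_cons, hstep, ih (acc ++ [t]) [c] (by simp)]
        rw [pvMergeT_nonspace t hth]
        simp [pvRecTok, hc]
    · have hstep : pvTokAdd (acc ++ [t]) c = (acc ++ [t]) ++ [[c]] := by
        simp [pvTokAdd, hc, hlast]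
      rw [List.foldl_cons, hstep, ih (acc ++ [t]) [c] (by simp)]
      have h1 : pvMergeT [c] (pvRecTok l) = [c] :: pvRecTok l :=
        pvMergeT_nonspace [c] (by simpa using hc) _
      by_cases hth : t.head? = some ' ' <;>
        cases htok : pvRecTok l <;>
          simp_all [pvRecTok, pvMergeT, hc]

theorem pvTokens_eq (l : List Char) : pvTokens l = pvRecTok l := by
  cases l with
  | nil => rfl
  | cons c l =>
    have hstep : pvTokAdd [] c = [] ++ [[c]] := by simp [pvTokAdd]
    unfold pvTokens
    rw [List.foldl_cons, hstep, pvTokens_gen l [] [c] (by simp)]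
    by_cases hc : c = ' '
    · simp [pvRecTok, hc]
    · rw [pvMergeT_nonspace [c] (by simpa using hc)]
      simp [pvRecTok, hc]

-- pvGoB ignores the flag when the first token is not a space run (or there is none)
theorem pvGoB_flag (period : Int) (toks : List (List Char))
    (h : ((toks.head?.map pvIsSym).getD true) = true) :
    pvGoB period true toks = pvGoB period false toks := by
  cases toks with
  | nil => rfl
  | cons t r =>
    simp only [List.head?_cons, Option.map_some, Option.getD_some] at h
    simp [pvGoB, h]

theorem pvRecTok_head_ok {r : List Char} (h : r.head? ≠ some ' ') :
    ((pvRecTok r).head?.map pvIsSym).getD true = true := by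
  cases r with
  | nil => simp [pvRecTok]
  | cons d r' =>
    have hd : ¬ d = ' ' := by simpa using h
    simp [pvRecTok, hd, pvIsSym]

-- leading space run of length s: tokenization splits it off
theorem pvRecTok_spaces (s : Nat) (hs : 1 ≤ s) (r : List Char) (hr : r.head? ≠ some ' ') :
    pvRecTok (List.replicate s ' ' ++ r) = List.replicate s ' ' :: pvRecTok r := by
  induction s with
  | zero => omega
  | succ n ih =>
    by_cases hn : 1 ≤ n
    · have := ih hn
      rw [List.replicate_succ]
      simp only [List.cons_append, pvRecTok, if_pos rfl]
      rw [this]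
      have hhead : (List.replicate n ' ').head? = some ' ' := by
        cases n with
        | zero => omega
        | succ m => simp [List.replicate_succ]
      simp [pvMergeT, hhead, List.replicate_succ]
    · have hn0 : n = 0 := by omega
      subst hn0
      simp only [List.replicate_succ, List.replicate_zero, List.nil_append, List.cons_append,
        pvRecTok, if_pos rfl]
      cases hrec : pvRecTok r with
      | nil => simp [pvMergeT]
      | cons h t =>
        have hh : h.head? ≠ some ' ' := by
          cases r with
          | nil => simp [pvRecTok] at hrec
          | cons d r' =>
            have hd : ¬ d = ' ' := by simpa using hr
            simp only [pvRecTok, if_neg hd, List.cons.injEq] at hrec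
            rw [← hrec.1]
            simpa using hd
        simp [pvMergeT, hh]

-- the space-counting scan: decomposition of a list at its leading spaces
theorem pvCountSpaces_take (l : List Char) :
    List.take (pvCountSpaces l) l = List.replicate (pvCountSpaces l) ' ' := by
  induction l with
  | nil => simp [pvCountSpaces]
  | cons c l ih =>
    by_cases hc : c = ' '
    · simp [pvCountSpaces, hc, List.replicate_succ, ih]
    · simp [pvCountSpaces, hc]

theorem pvCountSpaces_drop (l : List Char) :
    (List.drop (pvCountSpaces l) l).head? ≠ some ' ' := by
  induction l with
  | nil => simp [pvCountSpaces]
  | cons c l ih =>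
    by_cases hc : c = ' '
    · simpa [pvCountSpaces, hc] using ih
    · simp [pvCountSpaces, hc]

-- '1' * PERIOD * period = '1' * (PERIOD * period) for PERIOD ≥ 0
theorem pvMul_one_flat (a : Char) (n : Nat) : (List.replicate n [a]).flatten = List.replicate n a := by
  induction n with
  | zero => rfl
  | succ m ih => simp [List.replicate_succ, ih]

theorem pvMul_mul (a : Char) (k p : Int) (hk : 0 ≤ k) :
    pvMul (pvMul [a] k) p = pvMul [a] (k * p) := by
  have hflat : ∀ (m n : Nat), (List.replicate n (List.replicate m a)).flatten =
      List.replicate (n * m) a := by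
    intro m n
    induction n with
    | zero => simp
    | succ j ih =>
      rw [List.replicate_succ, List.flatten_cons, ih, List.replicate_append_replicate]
      congr 1
      ring
  unfold pvMul
  rw [pvMul_one_flat, pvMul_one_flat, hflat]
  congr 1
  by_cases hp : 0 ≤ p
  · obtain ⟨kn, rfl⟩ := Int.eq_ofNat_of_zero_le hk
    obtain ⟨pn, rfl⟩ := Int.eq_ofNat_of_zero_le hp
    rw [← Int.natCast_mul, Int.toNat_natCast, Int.toNat_natCast, Int.toNat_natCast, Nat.mul_comm]
  · have h1 : p.toNat = 0 := by omega
    have h2 : (k * p).toNat = 0 := by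
      have : k * p ≤ 0 := mul_nonpos_of_nonneg_of_nonpos hk (by omega)
      omega
    simp [h1, h2]

theorem pvPERIODtok_single (c : Char) : pvPERIODtok [c] = pvPERIOD c := by
  unfold pvPERIODtok pvPERIOD
  by_cases h1 : c = '.' <;> by_cases h2 : c = '-' <;> simp [h1, h2]

theorem pvGoB_flat_sym (period : Int) (b : Bool) (c : Char) (hc : c ≠ ' ')
    (ts : List (List Char)) :
    (pvGoB period b ([c] :: ts)).flatten =
      pvMul ['1'] (pvPERIOD c * period) ++
        (if (ts.head?.map pvIsSym).getD false = true then pvMul ['0'] period else []) ++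
        (pvGoB period false ts).flatten := by
  have h1 : pvIsSym [c] = true := by simp [pvIsSym, hc]
  simp only [pvGoB, h1, if_true, pvPERIODtok_single]
  split_ifs <;> simp [List.append_assoc]

theorem pvGoB_space_run (period : Int) (s : Nat) (hs : 1 ≤ s) (ts : List (List Char)) :
    pvGoB period false (List.replicate s ' ' :: ts) =
      (if 3 ≤ s then pvMul ['0', '0', '0', '0', '0', '0', '0'] period
       else pvMul ['0', '0', '0'] period) :: pvGoB period false ts := by
  have hsp : pvIsSym (List.replicate s ' ') = false := by
    cases s with
    | zero => omega
    | succ m => simp [pvIsSym, List.replicate_succ]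
  simp [pvGoB, hsp]

-- equation lemmas for pvAuxA's branches
theorem pvAuxA_nil (period : Int) : pvAuxA period [] = [] := by rw [pvAuxA]

theorem pvAuxA_space (period : Int) (l : List Char) :
    pvAuxA period (' ' :: l) = pvAuxA period l := by
  rw [pvAuxA]; simp

theorem pvAuxA_sym_last (period : Int) (c : Char) (hc : c ≠ ' ') :
    pvAuxA period [c] = pvMul (pvMul ['1'] (pvPERIOD c)) period := by
  rw [pvAuxA]; simp [hc]

theorem pvAuxA_sym_sym (period : Int) (c d : Char) (hc : c ≠ ' ') (hd : d ≠ ' ')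
    (l : List Char) :
    pvAuxA period (c :: d :: l) =
      pvMul (pvMul ['1'] (pvPERIOD c)) period ++ pvMul ['0'] period ++ pvAuxA period (d :: l) := by
  rw [pvAuxA]; simp [hc, hd]

theorem pvAuxA_sym_space (period : Int) (c : Char) (hc : c ≠ ' ') (rest : List Char)
    (hr : rest.head? = some ' ') :
    pvAuxA period (c :: rest) =
      pvMul (pvMul ['1'] (pvPERIOD c)) period ++
        (if pvCountSpaces rest < 3 then pvMul ['0', '0', '0'] period
         else pvMul ['0', '0', '0', '0', '0', '0', '0'] period) ++
        pvAuxA period ((c :: rest).drop (pvCountSpaces rest)) := by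
  rw [pvAuxA]; simp [hc, hr]

-- main equivalence, by strong induction on the length of the suffix
theorem pvMain (period : Int) : ∀ (n : Nat) (l : List Char), l.length ≤ n →
    pvAuxA period l = (pvGoB period true (pvRecTok l)).flatten := by
  intro n
  induction n with
  | zero =>
    intro l hl
    have : l = [] := by cases l with | nil => rfl | cons a b => simp at hl
    subst this
    simp [pvAuxA_nil, pvRecTok, pvGoB]
  | succ n ih =>
    intro l hl
    cases l with
    | nil => simp [pvAuxA_nil, pvRecTok, pvGoB]
    | cons c rest =>
      by_cases hc : c = ' '
      · subst hc
        rw [pvAuxA_space, ih rest (by simpa using hl)]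
        -- RHS: pvRecTok (' '::rest) = pvMergeT [' '] (pvRecTok rest); flatten equal
        show _ = (pvGoB period true (pvRecTok (' ' :: rest))).flatten
        have hrec : pvRecTok (' ' :: rest) = pvMergeT [' '] (pvRecTok rest) := by
          simp [pvRecTok]
        rw [hrec]
        cases hX : pvRecTok rest with
        | nil => simp [pvMergeT, pvGoB, pvIsSym]
        | cons h r =>
          by_cases hh : h.head? = some ' '
          · have : pvMergeT [' '] (h :: r) = (' ' :: h) :: r := by simp [pvMergeT, hh]
            rw [this]
            have h1 : pvIsSym (' ' :: h) = false := by simp [pvIsSym]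
            have h2 : pvIsSym h = false := by simp [pvIsSym, hh]
            simp [pvGoB, h1, h2]
          · have : pvMergeT [' '] (h :: r) = [' '] :: h :: r := by simp [pvMergeT, hh]
            rw [this]
            have h1 : pvIsSym [' '] = false := by simp [pvIsSym]
            have h2 : pvIsSym h = true := by simp [pvIsSym, hh]
            simp [pvGoB, h1, h2]
      · -- symbol first char
        have hPc : (0 : Int) ≤ pvPERIOD c := by unfold pvPERIOD; split_ifs <;> norm_num
        have hrecc : pvRecTok (c :: rest) = [c] :: pvRecTok rest := by simp [pvRecTok, hc]
        cases rest with
        | nil =>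
          rw [pvAuxA_sym_last period c hc, hrecc]
          rw [pvGoB_flat_sym period true c hc]
          simp [pvRecTok, pvGoB, pvMul_mul '1' (pvPERIOD c) period hPc]
        | cons d r' =>
          by_cases hd : d = ' '
          · subst hd
            -- branch 1: symbol followed by a space run
            set s := pvCountSpaces (' ' :: r') with hs_def
            have hs1 : 1 ≤ s := by simp [hs_def, pvCountSpaces]
            have hdecomp : (' ' :: r') = List.replicate s ' ' ++ List.drop s (' ' :: r') := by
              conv_lhs => rw [← List.take_append_drop s (' ' :: r')]
              rw [pvCountSpaces_take]
            have hdrophead : (List.drop s (' ' :: r')).head? ≠ some ' ' := pvCountSpaces_drop _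
            rw [pvAuxA_sym_space period c hc (' ' :: r') (by simp)]
            have hdrop1 : (c :: ' ' :: r').drop s = ' ' :: List.drop s (' ' :: r') := by
              have h0 : (c :: ' ' :: r').drop s = List.drop (s - 1) (' ' :: r') := by
                cases hs : s with
                | zero => omega
                | succ m => simp
              rw [h0]
              conv_lhs => rw [hdecomp]
              rw [List.drop_append_of_le_length (by simp)]
              have h1 : List.drop (s - 1) (List.replicate s ' ') = List.replicate 1 ' ' := by
                rw [List.drop_replicate]
                congr 1
                omega
              simp [h1]
            rw [hdrop1, pvAuxA_space]
            have hlen : (List.drop s (' ' :: r')).length ≤ n := by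
              simp only [List.length_drop, List.length_cons]
              simp only [List.length_cons] at hl
              omega
            rw [ih _ hlen]
            -- now the B side
            rw [hrecc]
            conv_rhs => rw [hdecomp]
            rw [pvRecTok_spaces s hs1 _ hdrophead]
            rw [pvGoB_flat_sym period true c hc]
            have hsp : pvIsSym (List.replicate s ' ') = false := by
              cases hs : s with
              | zero => omega
              | succ m => simp [pvIsSym, List.replicate_succ]
            rw [pvGoB_space_run period s hs1]
            rw [pvGoB_flag period _ (pvRecTok_head_ok hdrophead)]
            simp only [List.head?_cons, Option.map_some, hsp, Option.getD_some, if_false,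
              Bool.false_eq_true, List.flatten_cons]
            rw [pvMul_mul '1' (pvPERIOD c) period hPc, ← hs_def]
            by_cases h3 : s < 3
            · simp [if_pos h3, if_neg (by omega : ¬ 3 ≤ s), List.append_assoc]
            · simp [if_neg h3, if_pos (by omega : 3 ≤ s), List.append_assoc]
          · -- branch 2: symbol followed by symbol
            rw [pvAuxA_sym_sym period c d hc hd r']
            have hlen : (d :: r').length ≤ n := by simpa using hl
            rw [ih _ hlen, hrecc]
            have hrd : pvRecTok (d :: r') = [d] :: pvRecTok r' := by simp [pvRecTok, hd]
            rw [pvGoB_flat_sym period true c hc]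
            rw [pvGoB_flag period _ (by rw [hrd]; simp [pvIsSym, hd])]
            rw [pvMul_mul '1' (pvPERIOD c) period hPc]
            have hnext : (((pvRecTok (d :: r')).head?.map pvIsSym).getD false) = true := by
              rw [hrd]; simp [pvIsSym, hd]
            rw [hnext]
            simp [List.append_assoc]

-- ===== VERDICT (by name: the statement is the Claim_ definition above) =====
theorem encode_bits_spec : Claim_equal_encode_bits := by
  intro morse_code period _ _
  unfold Spec_encode_bits encode_bits encode_bits_alt
  rw [pvTokens_eq, pvMain period morse_code.toList.length morse_code.toList le_rfl]
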